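-- pv_equiv track=rewrite | github.com/AlTrUiStIcPoTtErHeAd/SAFE-INTERN | utils/explanation_engine.py | explain_payment
-- ===== SOURCE A (Python) =====
-- from typing import Dict, Any, List
--
-- def explain_payment(details: List[str]) -> List[str]:
--     explanations = []
--
--     for d in details:
--         d = d.lower()
--
--         if "requested before" in d:
--             explanations.append(
--                 "Payment is requested before the internship begins, which is uncommon and should be verified carefully."
--             )
--         elif "specific payment amount" in d:
--             explanations.append(
--                 "A specific payment amount is mentioned in the communication."
--             )
--         elif "payment mentioned" in d:
--             explanations.append(
--                 "Payment-related language appears in the communication."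
--             )
--
--     return explanations
-- ===== SOURCE B (Python) =====
-- MSG_BEFORE = "Payment is requested before the internship begins, which is uncommon and should be verified carefully."
-- MSG_AMOUNT = "A specific payment amount is mentioned in the communication."
-- MSG_MENTION = "Payment-related language appears in the communication."
--
-- # 8-entry table indexed by a 3-bit presence mask (bit0 = "requested before",
-- # bit1 = "specific payment amount", bit2 = "payment mentioned"); the priority
-- # of the original ladder is pre-encoded: the lowest set bit's message wins.
-- TABLE = [None,
--          MSG_BEFORE,   # 001
--          MSG_AMOUNT,   # 010
--          MSG_BEFORE,   # 011
--          MSG_MENTION,  # 100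
--          MSG_BEFORE,   # 101
--          MSG_AMOUNT,   # 110
--          MSG_BEFORE]   # 111
--
-- def explain_payment(details):
--     out = []
--     for d in details:
--         d = d.lower()
--         mask = (("requested before" in d)
--                 | (("specific payment amount" in d) << 1)
--                 | (("payment mentioned" in d) << 2))
--         if mask:
--             out.append(TABLE[mask])
--     return out
-- ===== Notes on version B (the rewrite author's own statement) =====
-- stated objective: alternative
-- what changed: Replaced the first-match if/elif ladder by branch-free evaluation of all three substring tests into a 3-bit presence mask, with the ladder's priority pre-encoded in an 8-entry lookup table indexed by the mask.
import Mathlib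
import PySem

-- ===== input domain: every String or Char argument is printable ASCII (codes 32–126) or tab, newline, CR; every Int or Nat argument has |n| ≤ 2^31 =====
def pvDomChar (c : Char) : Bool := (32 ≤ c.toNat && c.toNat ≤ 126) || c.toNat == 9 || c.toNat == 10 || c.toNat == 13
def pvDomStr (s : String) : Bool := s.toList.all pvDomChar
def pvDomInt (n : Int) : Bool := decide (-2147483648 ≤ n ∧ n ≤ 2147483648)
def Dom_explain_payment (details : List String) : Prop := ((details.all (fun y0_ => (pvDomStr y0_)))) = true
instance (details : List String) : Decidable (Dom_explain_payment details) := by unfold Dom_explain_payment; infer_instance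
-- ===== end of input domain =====

-- B replaces the if/elif ladder by a 3-bit presence mask of all three substring tests and an 8-entry priority table (alternative; same cost).

-- ===== PORT A =====
def explain_payment (details : List String) : List String :=
  details.foldl (fun explanations d0 =>
    let d := PySem.Str.lower d0
    if PySem.Str.isIn "requested before" d then
      explanations ++ ["Payment is requested before the internship begins, which is uncommon and should be verified carefully."]
    else if PySem.Str.isIn "specific payment amount" d then
      explanations ++ ["A specific payment amount is mentioned in the communication."]
    else if PySem.Str.isIn "payment mentioned" d then
      explanations ++ ["Payment-related language appears in the communication."]
    else explanations) []

-- ===== PORT B =====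
def pvMsgBefore : String := "Payment is requested before the internship begins, which is uncommon and should be verified carefully."
def pvMsgAmount : String := "A specific payment amount is mentioned in the communication."
def pvMsgMention : String := "Payment-related language appears in the communication."

-- 8-entry table indexed by the 3-bit presence mask; priority pre-encoded (lowest set bit wins)
def pvTable : List (Option String) :=
  [none, some pvMsgBefore, some pvMsgAmount, some pvMsgBefore,
   some pvMsgMention, some pvMsgBefore, some pvMsgAmount, some pvMsgBefore]

def explain_payment_alt (details : List String) : List String :=
  details.foldl (fun out d0 =>
    let d := PySem.Str.lower d0
    let mask : Nat :=
      (if PySem.Str.isIn "requested before" d then 1 else 0)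
      ||| ((if PySem.Str.isIn "specific payment amount" d then 1 else 0) <<< 1)
      ||| ((if PySem.Str.isIn "payment mentioned" d then 1 else 0) <<< 2)
    if mask ≠ 0 then
      match pvTable.getD mask none with
      | some m => out ++ [m]
      | none => out
    else out) []

-- ===== PRECONDITION & SPEC =====
def Spec_explain_payment (details : List String) (out : List String) : Prop := out = explain_payment_alt details
instance (details : List String) (out : List String) : Decidable (Spec_explain_payment details out) := by unfold Spec_explain_payment; infer_instance

-- ===== CLAIM =====
def Claim_equal_explain_payment : Prop := ∀ (details : List String), Dom_explain_payment details → Spec_explain_payment details (explain_payment details)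

-- ===== LEMMAS AND PROOFS =====
theorem explain_payment_step (acc : List String) (d0 : String) :
    (fun explanations d0 =>
      let d := PySem.Str.lower d0
      if PySem.Str.isIn "requested before" d then
        explanations ++ ["Payment is requested before the internship begins, which is uncommon and should be verified carefully."]
      else if PySem.Str.isIn "specific payment amount" d then
        explanations ++ ["A specific payment amount is mentioned in the communication."]
      else if PySem.Str.isIn "payment mentioned" d then
        explanations ++ ["Payment-related language appears in the communication."]
      else explanations) acc d0
    = (fun out d0 =>
      let d := PySem.Str.lower d0
      let mask : Nat :=
        (if PySem.Str.isIn "requested before" d then 1 else 0)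
        ||| ((if PySem.Str.isIn "specific payment amount" d then 1 else 0) <<< 1)
        ||| ((if PySem.Str.isIn "payment mentioned" d then 1 else 0) <<< 2)
      if mask ≠ 0 then
        match pvTable.getD mask none with
        | some m => out ++ [m]
        | none => out
      else out) acc d0 := by
  simp only
  split_ifs <;> simp_all [pvTable, pvMsgBefore, pvMsgAmount, pvMsgMention]

-- ===== VERDICT =====
theorem explain_payment_spec : Claim_equal_explain_payment := by
  intro details _
  show explain_payment details = explain_payment_alt details
  unfold explain_payment explain_payment_alt
  exact congrFun
    (congrArg (fun f => List.foldl f ([] : List String))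
      (funext fun a => funext fun d => explain_payment_step a d)) details
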